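-- pv_equiv track=rewrite | github.com/GitHub-Traveler/algorithm | codeforces/2163/b.py | check
-- ===== SOURCE A (Python) =====
-- import copy
--
-- def check(
--     p: list[int],
--     x: list[int],
--     s: list[int],
--     n: int,
--     current_ops: list,
--     current_step: int,
-- ) -> list | None:
--     if current_step == 5:
--         flag = True
--         for i in range(n):
--             if x[i] == 1 and s[i] == 0:
--                 flag = False
--                 break
--         if flag:
--             return current_ops
--         else:
--             return None
--     else:
--         current_max = 0
--         current_max_index = -1
--         max_left = -1
--         max_right = -1
--         min_left = -1
--         min_right = -1
--         for i in range(n):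
--             if s[i] == 0 and x[i] == 1 and p[i] > current_max:
--                 current_max = p[i]
--                 current_max_index = i
--
--         if current_max_index == -1:
--             return current_ops
--         else:
--             for i in range(0, current_max_index):
--                 if p[i] < current_max and min_left == -1:
--                     min_left = i
--                 if p[i] > current_max and max_left == -1:
--                     max_left = i
--
--             for i in range(n - 1, current_max_index, -1):
--                 if p[i] < current_max and min_right == -1:
--                     min_right = i
--                 if p[i] > current_max and max_right == -1:
--                     max_right = i
--             final_ops = None
--             if max_right != -1 and min_left != -1:
--                 new_s = copy.deepcopy(s)
--                 new_ops = current_ops + [[min_left + 1, max_right + 1]]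
--                 for i in range(min_left + 1, max_right):
--                     if x[i] == 1:
--                         new_s[i] = 1
--                 final_ops = check(p, x, new_s, n, new_ops, current_step + 1)
--
--             if final_ops is not None:
--                 return final_ops
--
--             if max_left != -1 and min_right != -1:
--                 new_s = copy.deepcopy(s)
--                 new_ops = current_ops + [[max_left + 1, min_right + 1]]
--                 for i in range(max_left + 1, min_right):
--                     if x[i] == 1:
--                         new_s[i] = 1
--                 final_ops = check(p, x, new_s, n, new_ops, current_step + 1)
--
--             return final_ops
-- ===== SOURCE B (Python) =====
-- def check(
--     p: list[int],
--     x: list[int],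
--     s: list[int],
--     n: int,
--     current_ops: list,
--     current_step: int,
-- ) -> list | None:
--     # Explicit-stack DFS instead of recursion; branch 1 is pushed last so it is
--     # explored first, preserving the recursive preference order.
--     stack = [(list(s), list(current_ops), current_step)]
--     while stack:
--         cs, ops, step = stack.pop()
--         if step == 5:
--             if all(not (x[i] == 1 and cs[i] == 0) for i in range(n)):
--                 return ops
--             continue
--         cur_max, idx = 0, -1
--         for i in range(n):
--             if cs[i] == 0 and x[i] == 1 and p[i] > cur_max:
--                 cur_max, idx = p[i], i
--         if idx == -1:
--             return ops
--         min_left = next((i for i in range(idx) if p[i] < cur_max), -1)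
--         max_left = next((i for i in range(idx) if p[i] > cur_max), -1)
--         min_right = next((i for i in range(n - 1, idx, -1) if p[i] < cur_max), -1)
--         max_right = next((i for i in range(n - 1, idx, -1) if p[i] > cur_max), -1)
--         if max_left != -1 and min_right != -1:
--             ns = list(cs)
--             for i in range(max_left + 1, min_right):
--                 if x[i] == 1:
--                     ns[i] = 1
--             stack.append((ns, ops + [[max_left + 1, min_right + 1]], step + 1))
--         if max_right != -1 and min_left != -1:
--             ns = list(cs)
--             for i in range(min_left + 1, max_right):
--                 if x[i] == 1:
--                     ns[i] = 1
--             stack.append((ns, ops + [[min_left + 1, max_right + 1]], step + 1))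
--     return None
-- ===== Notes on version B (the rewrite author's own statement) =====
-- stated objective: alternative
-- what changed: A's recursive depth-first search is replaced by an explicit-stack iterative DFS: frames (s, ops, step) are pushed in reverse preference order and popped in a while loop, returning the first success leaf, with the four boundary scans done as first-match searches instead of A's flag-carrying combined loops.
-- outside the precondition, e.g. on check([], [], [1], 1, [], 0): A returns [], B returns []
import Mathlib
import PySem

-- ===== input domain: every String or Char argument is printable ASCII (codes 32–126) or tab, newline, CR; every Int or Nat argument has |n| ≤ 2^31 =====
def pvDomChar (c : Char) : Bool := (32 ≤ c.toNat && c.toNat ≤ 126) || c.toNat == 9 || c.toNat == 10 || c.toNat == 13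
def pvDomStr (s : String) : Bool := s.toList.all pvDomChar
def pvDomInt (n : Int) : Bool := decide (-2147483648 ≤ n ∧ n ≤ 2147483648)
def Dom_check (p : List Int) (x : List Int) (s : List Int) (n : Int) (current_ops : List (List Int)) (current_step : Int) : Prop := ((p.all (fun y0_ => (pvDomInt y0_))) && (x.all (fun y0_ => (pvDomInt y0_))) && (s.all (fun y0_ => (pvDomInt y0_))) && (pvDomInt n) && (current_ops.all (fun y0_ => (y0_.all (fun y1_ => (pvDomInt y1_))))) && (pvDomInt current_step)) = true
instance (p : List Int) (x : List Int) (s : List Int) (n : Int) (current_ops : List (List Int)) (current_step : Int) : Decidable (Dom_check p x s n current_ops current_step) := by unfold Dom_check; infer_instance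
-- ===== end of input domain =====

-- B replaces A's recursive DFS by an explicit-stack DFS (frames pushed in reverse preference
-- order) with first-match boundary searches; objective: alternative decomposition, same cost.


-- ===== PORT A =====
-- shared helper: the "for i in range(a, b): if x[i] == 1: new_s[i] = 1" loop, identical in both Pythons
def pvApplyOp (x : List Int) (s : List Int) (a : Int) (b : Int) : List Int :=
  (PySem.List.pyRange a b 1).foldl
    (fun acc i => if PySem.List.pyGetD x i 0 = 1 then PySem.List.pySetD acc i 1 else acc) s

-- shared helper: the max-active-index loop, identical in both Pythons
def checkFindMax (p : List Int) (x : List Int) (s : List Int) (n : Int) : Int × Int :=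
  (PySem.List.pyRange 0 n 1).foldl
    (fun acc i =>
      if PySem.List.pyGetD s i 0 = 0 ∧ PySem.List.pyGetD x i 0 = 1 ∧ acc.1 < PySem.List.pyGetD p i 0
      then (PySem.List.pyGetD p i 0, i) else acc)
    (0, -1)

-- A's boundary loop: one pass recording (first index with p[i] < cm, first index with p[i] > cm)
def checkBounds (p : List Int) (cm : Int) (r : List Int) : Int × Int :=
  r.foldl
    (fun acc i =>
      (if PySem.List.pyGetD p i 0 < cm ∧ acc.1 = -1 then i else acc.1,
       if cm < PySem.List.pyGetD p i 0 ∧ acc.2 = -1 then i else acc.2))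
    (-1, -1)

-- A's final validity scan (flag-and-break loop, as a pure conjunction fold)
def checkScan (x : List Int) (s : List Int) (n : Int) : Bool :=
  (PySem.List.pyRange 0 n 1).foldl
    (fun fl i => fl && !(PySem.List.pyGetD x i 0 == 1 && PySem.List.pyGetD s i 0 == 0)) true

-- A's recursive body: one call of Python check's non-trivial work, with `rec` standing for
-- the recursive call; the fueled wrapper below ties the knot (fuel is only an artifact of
-- totality: inside Pre_ the fuel n.toNat + 3 exceeds the recursion depth, because each
-- recursive call deactivates the current max active index)
-- 'if final_ops is not None: return final_ops' — first-success chaining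
def pvOrElse {alpha : Type} (o : Option alpha) (e : Option alpha) : Option alpha :=
  match o with
  | some r => some r
  | none => e

def checkGoStep (p x : List Int) (n : Int)
    (rec : List Int → List (List Int) → Int → Option (List (List Int)))
    (s : List Int) (ops : List (List Int)) (step : Int) : Option (List (List Int)) :=
  if step = 5 then (if checkScan x s n then some ops else none)
  else
    let m := checkFindMax p x s n
    if m.2 = -1 then some ops
    else
      let lb := checkBounds p m.1 (PySem.List.pyRange 0 m.2 1)
      let rb := checkBounds p m.1 (PySem.List.pyRange (n - 1) m.2 (-1))
      let r1 : Option (List (List Int)) :=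
        if rb.2 ≠ -1 ∧ lb.1 ≠ -1 then
          rec (pvApplyOp x s (lb.1 + 1) rb.2) (ops ++ [[lb.1 + 1, rb.2 + 1]]) (step + 1)
        else none
      pvOrElse r1
        (if lb.2 ≠ -1 ∧ rb.1 ≠ -1 then
          rec (pvApplyOp x s (lb.2 + 1) rb.1) (ops ++ [[lb.2 + 1, rb.1 + 1]]) (step + 1)
        else none)

def checkGo (p x : List Int) (n : Int) :
    Nat → List Int → List (List Int) → Int → Option (List (List Int))
  | 0 => checkGoStep p x n (fun _ _ _ => none)
  | f + 1 => checkGoStep p x n (checkGo p x n f)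

def check (p : List Int) (x : List Int) (s : List Int) (n : Int) (current_ops : List (List Int)) (current_step : Int) : Option (List (List Int)) :=
  checkGo p x n (n.toNat + 3) s current_ops current_step

-- ===== PORT B =====
-- B's next((i for i in r if p[i] < cm), -1) / (... > cm ...) searches
def checkFindLt (p : List Int) (cm : Int) (r : List Int) : Int :=
  (r.find? (fun i => decide (PySem.List.pyGetD p i 0 < cm))).getD (-1)
def checkFindGt (p : List Int) (cm : Int) (r : List Int) : Int :=
  (r.find? (fun i => decide (cm < PySem.List.pyGetD p i 0))).getD (-1)

-- B's all(...) validity test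
def checkAltOk (x : List Int) (cs : List Int) (n : Int) : Bool :=
  (PySem.List.pyRange 0 n 1).all
    (fun i => !(PySem.List.pyGetD x i 0 == 1 && PySem.List.pyGetD cs i 0 == 0))

-- B's while-loop over the explicit stack, fueled; inside Pre_ the fuel 2^(n.toNat+3)
-- exceeds the number of frames ever pushed
def checkLoop (p : List Int) (x : List Int) (n : Int) :
    Nat → List (List Int × List (List Int) × Int) → Option (List (List Int))
  | _, [] => none
  | 0, _ :: _ => none
  | fuel + 1, (cs, ops, step) :: rest =>
    if step = 5 then
      if checkAltOk x cs n then some ops else checkLoop p x n fuel rest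
    else
      let m := checkFindMax p x cs n
      if m.2 = -1 then some ops
      else
        let ml := checkFindLt p m.1 (PySem.List.pyRange 0 m.2 1)
        let Ml := checkFindGt p m.1 (PySem.List.pyRange 0 m.2 1)
        let mr := checkFindLt p m.1 (PySem.List.pyRange (n - 1) m.2 (-1))
        let Mr := checkFindGt p m.1 (PySem.List.pyRange (n - 1) m.2 (-1))
        let st1 := if Ml ≠ -1 ∧ mr ≠ -1 then
            (pvApplyOp x cs (Ml + 1) mr, ops ++ [[Ml + 1, mr + 1]], step + 1) :: rest else rest
        let st2 := if Mr ≠ -1 ∧ ml ≠ -1 then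
            (pvApplyOp x cs (ml + 1) Mr, ops ++ [[ml + 1, Mr + 1]], step + 1) :: st1 else st1
        checkLoop p x n fuel st2

def check_alt (p : List Int) (x : List Int) (s : List Int) (n : Int) (current_ops : List (List Int)) (current_step : Int) : Option (List (List Int)) :=
  checkLoop p x n (2 ^ (n.toNat + 3)) [(s, current_ops, current_step)]

-- ===== PRECONDITION & SPEC =====
-- Pre_ excludes inputs with n exceeding a list's length (p's length only matters when
-- current_step ≠ 5, where the max-search reads p): there Python A reads p[i]/x[i]/s[i] out of
-- range and raises IndexError (except on corner inputs whose short-circuiting `and` never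
-- reaches the out-of-range read; see the cite).
def Pre_check (p : List Int) (x : List Int) (s : List Int) (n : Int) (current_ops : List (List Int)) (current_step : Int) : Prop :=
  n ≤ (x.length : Int) ∧ n ≤ (s.length : Int) ∧ (current_step = 5 ∨ n ≤ (p.length : Int))
instance (p : List Int) (x : List Int) (s : List Int) (n : Int) (current_ops : List (List Int)) (current_step : Int) : Decidable (Pre_check p x s n current_ops current_step) := by unfold Pre_check; infer_instance

def pvWitness_check : List Int × List Int × List Int × Int × List (List Int) × Int :=
  ([3, 1, 2], [1, 1, 1], [0, 0, 0], 3, [], 0)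

def Spec_check (p : List Int) (x : List Int) (s : List Int) (n : Int) (current_ops : List (List Int)) (current_step : Int) (out : Option (List (List Int))) : Prop := out = check_alt p x s n current_ops current_step
instance (p : List Int) (x : List Int) (s : List Int) (n : Int) (current_ops : List (List Int)) (current_step : Int) (out : Option (List (List Int))) : Decidable (Spec_check p x s n current_ops current_step out) := by unfold Spec_check; infer_instance

-- ===== CLAIM (what is proved, stated in full; the proofs are below) =====
def Claim_equal_check : Prop := ∀ (p : List Int) (x : List Int) (s : List Int) (n : Int) (current_ops : List (List Int)) (current_step : Int), Dom_check p x s n current_ops current_step → Pre_check p x s n current_ops current_step → Spec_check p x s n current_ops current_step (check p x s n current_ops current_step)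

-- ===== LEMMAS AND PROOFS =====

-- "active" indices: those the max-search can select; their number strictly drops at each recursion
def pvActive (p : List Int) (x : List Int) (s : List Int) (i : Int) : Prop :=
  PySem.List.pyGetD s i 0 = 0 ∧ PySem.List.pyGetD x i 0 = 1 ∧ 0 < PySem.List.pyGetD p i 0
def pvCnt (p : List Int) (x : List Int) (s : List Int) (n : Int) : Nat :=
  (PySem.List.pyRange 0 n 1).countP (fun i =>
    decide (PySem.List.pyGetD s i 0 = 0 ∧ PySem.List.pyGetD x i 0 = 1 ∧ 0 < PySem.List.pyGetD p i 0))

-- the recursion tree linearised: first success among the frames, each run at its canonical fuel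
def pvRun (p : List Int) (x : List Int) (n : Int) :
    List (List Int × List (List Int) × Int) → Option (List (List Int))
  | [] => none
  | (s, ops, step) :: rest =>
    pvOrElse (checkGo p x n (pvCnt p x s n + 1) s ops step) (pvRun p x n rest)


theorem pv_foldl_and_all {α : Type} (f : α → Bool) :
    ∀ (l : List α) (b : Bool), l.foldl (fun fl i => fl && f i) b = (b && l.all f)
  | [], b => by simp
  | a :: t, b => by
    simp [List.foldl_cons, pv_foldl_and_all f t, Bool.and_assoc]

theorem checkScan_eq_ok (x s : List Int) (n : Int) : checkScan x s n = checkAltOk x s n := by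
  simp [checkScan, checkAltOk, pv_foldl_and_all]

theorem checkFindLt_mem (p : List Int) (cm : Int) (r : List Int) :
    checkFindLt p cm r = -1 ∨ checkFindLt p cm r ∈ r := by
  unfold checkFindLt
  cases h : r.find? (fun i => decide (PySem.List.pyGetD p i 0 < cm)) with
  | none => left; rfl
  | some j => right; simpa using List.mem_of_find?_eq_some h

theorem checkFindGt_mem (p : List Int) (cm : Int) (r : List Int) :
    checkFindGt p cm r = -1 ∨ checkFindGt p cm r ∈ r := by
  unfold checkFindGt
  cases h : r.find? (fun i => decide (cm < PySem.List.pyGetD p i 0)) with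
  | none => left; rfl
  | some j => right; simpa using List.mem_of_find?_eq_some h

theorem pv_first_stay (q : Int → Prop) [DecidablePred q] :
    ∀ (l : List Int) (a : Int), a ≠ -1 →
      l.foldl (fun a i => if q i ∧ a = -1 then i else a) a = a
  | [], a, _ => rfl
  | j :: t, a, h => by
    simp only [List.foldl_cons]
    rw [if_neg (by tauto)]
    exact pv_first_stay q t a h

theorem pv_first_eq (q : Int → Prop) [DecidablePred q] :
    ∀ (l : List Int), (∀ i ∈ l, i ≠ -1) →
      l.foldl (fun a i => if q i ∧ a = -1 then i else a) (-1)
        = (l.find? (fun i => decide (q i))).getD (-1)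
  | [], _ => rfl
  | j :: t, h => by
    simp only [List.foldl_cons]
    by_cases hq : q j
    · rw [if_pos (by simp [hq]), pv_first_stay q t j (h j List.mem_cons_self),
        List.find?_cons_of_pos (by simpa using hq)]
      rfl
    · rw [if_neg (by tauto), List.find?_cons_of_neg (by simpa using hq)]
      exact pv_first_eq q t (fun i hi => h i (List.mem_cons_of_mem _ hi))

theorem checkBounds_eq (p : List Int) (cm : Int) (r : List Int) (h : ∀ i ∈ r, i ≠ -1) :
    checkBounds p cm r = (checkFindLt p cm r, checkFindGt p cm r) := by
  unfold checkBounds checkFindLt checkFindGt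
  rw [PySem.List.foldl_prod_mk
      (f := fun a i => if PySem.List.pyGetD p i 0 < cm ∧ a = -1 then i else a)
      (g := fun a i => if cm < PySem.List.pyGetD p i 0 ∧ a = -1 then i else a)]
  rw [pv_first_eq _ r h, pv_first_eq _ r h]

theorem pvCnt_le (p x s : List Int) (n : Int) : pvCnt p x s n ≤ n.toNat := by
  unfold pvCnt
  have := List.countP_le_length (l := PySem.List.pyRange 0 n 1)
    (p := fun i =>
      decide (PySem.List.pyGetD s i 0 = 0 ∧ PySem.List.pyGetD x i 0 = 1 ∧ 0 < PySem.List.pyGetD p i 0))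
  simpa [PySem.List.length_pyRange_one] using this


def pvMaxP (p x s : List Int) (n : Int) (acc : Int × Int) : Prop :=
  acc = (0, -1) ∨ (0 ≤ acc.2 ∧ acc.2 < n ∧ pvActive p x s acc.2 ∧
    acc.1 = PySem.List.pyGetD p acc.2 0)

theorem pv_findMax_aux (p x s : List Int) (n : Int) :
    ∀ (l : List Int) (acc : Int × Int), (∀ i ∈ l, 0 ≤ i ∧ i < n) →
      pvMaxP p x s n acc →
      pvMaxP p x s n (l.foldl (fun acc i =>
          if PySem.List.pyGetD s i 0 = 0 ∧ PySem.List.pyGetD x i 0 = 1 ∧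
              acc.1 < PySem.List.pyGetD p i 0
          then (PySem.List.pyGetD p i 0, i) else acc) acc)
  | [], acc, _, hacc => hacc
  | j :: t, acc, hl, hacc => by
    simp only [List.foldl_cons]
    apply pv_findMax_aux p x s n t _ (fun i hi => hl i (List.mem_cons_of_mem _ hi))
    by_cases hc : PySem.List.pyGetD s j 0 = 0 ∧ PySem.List.pyGetD x j 0 = 1 ∧
        acc.1 < PySem.List.pyGetD p j 0
    · rw [if_pos hc]
      right
      have hj := hl j List.mem_cons_self
      have hpos : 0 < PySem.List.pyGetD p j 0 := by
        rcases hacc with h | h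
        · have : acc.1 = 0 := by rw [h]
          omega
        · have := h.2.2.1.2.2
          omega
      exact ⟨hj.1, hj.2, ⟨hc.1, hc.2.1, hpos⟩, rfl⟩
    · rw [if_neg hc]; exact hacc

theorem findMax_spec (p x s : List Int) (n : Int) :
    (checkFindMax p x s n).2 = -1 ∨
      (0 ≤ (checkFindMax p x s n).2 ∧ (checkFindMax p x s n).2 < n ∧
        pvActive p x s (checkFindMax p x s n).2 ∧
        (checkFindMax p x s n).1 = PySem.List.pyGetD p (checkFindMax p x s n).2 0) := by
  have h := pv_findMax_aux p x s n (PySem.List.pyRange 0 n 1) (0, -1)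
    (fun i hi => by
      have := (PySem.List.mem_pyRange_one).1 hi
      omega)
    (Or.inl rfl)
  rcases h with h | h
  · left; rw [checkFindMax, h]
  · right; exact h

theorem pv_getD_nonneg (xs : List Int) (i : Int) (h : 0 ≤ i) :
    PySem.List.pyGetD xs i 0 = xs.getD i.toNat 0 := by
  rw [show i = ((i.toNat : Nat) : Int) from (Int.toNat_of_nonneg h).symm,
    PySem.List.pyGetD_natCast]
  simp [show max i 0 = i from by omega]

theorem pv_getD_setD_one (s : List Int) (j i : Int) (hj : 0 ≤ j) (hi : 0 ≤ i) :
    PySem.List.pyGetD (PySem.List.pySetD s j 1) i 0 = PySem.List.pyGetD s i 0 ∨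
      PySem.List.pyGetD (PySem.List.pySetD s j 1) i 0 = 1 := by
  rw [PySem.List.pySetD_of_nonneg s 1 hj, pv_getD_nonneg _ _ hi, pv_getD_nonneg _ _ hi]
  by_cases he : i.toNat = j.toNat
  · rw [← he]
    by_cases hlen : i.toNat < s.length
    · right; simp [List.getD, List.getElem?_set, hlen]
    · left; simp [List.getD, hlen]
  · left; simp [List.getD, Ne.symm he]

theorem pv_getD_setD_self (s : List Int) (i : Int) (h0 : 0 ≤ i) (hl : i < (s.length : Int)) :
    PySem.List.pyGetD (PySem.List.pySetD s i 1) i 0 = 1 := by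
  rw [PySem.List.pySetD_of_nonneg s 1 h0, pv_getD_nonneg _ _ h0]
  have : i.toNat < s.length := by omega
  simp [List.getD, List.getElem?_set, this]

theorem pv_apply_len_aux (x : List Int) :
    ∀ (l : List Int) (s : List Int),
      (l.foldl (fun acc i => if PySem.List.pyGetD x i 0 = 1 then PySem.List.pySetD acc i 1 else acc) s).length = s.length
  | [], s => rfl
  | j :: t, s => by
    simp only [List.foldl_cons]
    rw [pv_apply_len_aux x t]
    split
    · exact PySem.List.length_pySetD s j 1
    · rfl

theorem applyOp_length (x s : List Int) (a b : Int) : (pvApplyOp x s a b).length = s.length := by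
  unfold pvApplyOp; exact pv_apply_len_aux x _ s

theorem pv_apply_getD_aux (x : List Int) (i : Int) (hi : 0 ≤ i) :
    ∀ (l : List Int) (s : List Int), (∀ j ∈ l, 0 ≤ j) →
      (PySem.List.pyGetD (l.foldl (fun acc k => if PySem.List.pyGetD x k 0 = 1 then PySem.List.pySetD acc k 1 else acc) s) i 0 = PySem.List.pyGetD s i 0 ∨
       PySem.List.pyGetD (l.foldl (fun acc k => if PySem.List.pyGetD x k 0 = 1 then PySem.List.pySetD acc k 1 else acc) s) i 0 = 1)
  | [], s, _ => Or.inl rfl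
  | j :: t, s, hl => by
    simp only [List.foldl_cons]
    by_cases hs : PySem.List.pyGetD x j 0 = 1
    · rw [if_pos hs]
      rcases pv_apply_getD_aux x i hi t (PySem.List.pySetD s j 1)
        (fun k hk => hl k (List.mem_cons_of_mem _ hk)) with h | h
      · rw [h]
        exact pv_getD_setD_one s j i (hl j List.mem_cons_self) hi
      · right; exact h
    · rw [if_neg hs]
      exact pv_apply_getD_aux x i hi t s (fun k hk => hl k (List.mem_cons_of_mem _ hk))

theorem applyOp_getD (x s : List Int) (a b i : Int) (ha : 0 ≤ a) (hi : 0 ≤ i) :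
    PySem.List.pyGetD (pvApplyOp x s a b) i 0 = PySem.List.pyGetD s i 0 ∨
      PySem.List.pyGetD (pvApplyOp x s a b) i 0 = 1 := by
  unfold pvApplyOp
  exact pv_apply_getD_aux x i hi _ s
    (fun j hj => by have := (PySem.List.mem_pyRange_one).1 hj; omega)

theorem pv_apply_one_aux (x : List Int) (idx : Int) (hx : PySem.List.pyGetD x idx 0 = 1)
    (h0 : 0 ≤ idx) :
    ∀ (l : List Int) (s : List Int), (∀ j ∈ l, 0 ≤ j) → idx < (s.length : Int) →
      (idx ∈ l ∨ PySem.List.pyGetD s idx 0 = 1) →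
      PySem.List.pyGetD (l.foldl (fun acc k => if PySem.List.pyGetD x k 0 = 1 then PySem.List.pySetD acc k 1 else acc) s) idx 0 = 1
  | [], s, _, _, hd => by
    rcases hd with h | h
    · exact absurd h (List.not_mem_nil)
    · exact h
  | j :: t, s, hl, hlen, hd => by
    simp only [List.foldl_cons]
    have hlen' : idx < (((if PySem.List.pyGetD x j 0 = 1 then PySem.List.pySetD s j 1 else s).length : Nat) : Int) := by
      split
      · rw [PySem.List.length_pySetD]; exact hlen
      · exact hlen
    apply pv_apply_one_aux x idx hx h0 t _ (fun k hk => hl k (List.mem_cons_of_mem _ hk)) hlen'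
    rcases hd with hmem | hone
    · rcases List.mem_cons.1 hmem with rfl | hmem'
      · right
        rw [if_pos hx]
        exact pv_getD_setD_self s idx h0 hlen
      · left; exact hmem'
    · right
      split <;> rename_i hs
      · rcases pv_getD_setD_one s j idx (hl j List.mem_cons_self) h0 with h | h
        · rw [h]; exact hone
        · exact h
      · exact hone

theorem applyOp_one (x s : List Int) (a b idx : Int) (h1 : a ≤ idx) (h2 : idx < b)
    (hx : PySem.List.pyGetD x idx 0 = 1) (h0 : 0 ≤ idx) (ha : 0 ≤ a)
    (hl : idx < (s.length : Int)) :
    PySem.List.pyGetD (pvApplyOp x s a b) idx 0 = 1 := by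
  unfold pvApplyOp
  exact pv_apply_one_aux x idx hx h0 _ s
    (fun j hj => by have := (PySem.List.mem_pyRange_one).1 hj; omega) hl
    (Or.inl ((PySem.List.mem_pyRange_one).2 ⟨h1, h2⟩))

theorem pv_countP_lt (P Q : Int → Bool) :
    ∀ (l : List Int), (∀ i ∈ l, Q i = true → P i = true) →
      ∀ j, j ∈ l → P j = true → Q j = false → l.countP Q < l.countP P
  | [], _, j, hj, _, _ => absurd hj (List.not_mem_nil)
  | a :: t, hmono, j, hj, hP, hQ => by
    have hle : t.countP Q ≤ t.countP P :=
      List.countP_mono_left (fun i hi => hmono i (List.mem_cons_of_mem _ hi))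
    rcases List.mem_cons.1 hj with rfl | hj'
    · rw [List.countP_cons, List.countP_cons, hP, hQ]
      simpa using Nat.lt_succ_of_le hle
    · have := pv_countP_lt P Q t (fun i hi => hmono i (List.mem_cons_of_mem _ hi)) j hj' hP hQ
      rw [List.countP_cons, List.countP_cons]
      have hca : (if Q a = true then 1 else 0) ≤ (if P a = true then 1 else 0) := by
        by_cases hqa : Q a = true
        · simp [hqa, hmono a List.mem_cons_self hqa]
        · simp [hqa]
      exact Nat.add_lt_add_of_lt_of_le this hca

theorem cnt_child_lt (p x s : List Int) (n : Int) (a b idx : Int)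
    (hact : pvActive p x s idx) (h0 : 0 ≤ idx) (hn : idx < n)
    (h1 : a ≤ idx) (h2 : idx < b) (ha : 0 ≤ a) (hl : idx < (s.length : Int)) :
    pvCnt p x (pvApplyOp x s a b) n < pvCnt p x s n := by
  unfold pvCnt
  apply pv_countP_lt _ _ _ _ idx ((PySem.List.mem_pyRange_one).2 ⟨h0, hn⟩)
  · simpa using hact
  · simp only [decide_eq_false_iff_not]
    intro hact'
    have := hact'.1
    rw [applyOp_one x s a b idx h1 h2 hact.2.1 h0 ha hl] at this
    omega
  · intro i hi hQ
    have hi' := (PySem.List.mem_pyRange_one).1 hi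
    simp only [decide_eq_true_eq] at hQ ⊢
    rcases applyOp_getD x s a b i ha hi'.1 with h | h
    · exact ⟨by rw [← h]; exact hQ.1, hQ.2⟩
    · rw [h] at hQ
      omega


theorem pv_lt_left (p : List Int) (cm idx : Int)
    (h : checkFindLt p cm (PySem.List.pyRange 0 idx 1) ≠ -1) :
    0 ≤ checkFindLt p cm (PySem.List.pyRange 0 idx 1) ∧
      checkFindLt p cm (PySem.List.pyRange 0 idx 1) < idx := by
  rcases checkFindLt_mem p cm (PySem.List.pyRange 0 idx 1) with h' | h'
  · exact absurd h' h
  · exact PySem.List.mem_pyRange_one.1 h'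

theorem pv_gt_left (p : List Int) (cm idx : Int)
    (h : checkFindGt p cm (PySem.List.pyRange 0 idx 1) ≠ -1) :
    0 ≤ checkFindGt p cm (PySem.List.pyRange 0 idx 1) ∧
      checkFindGt p cm (PySem.List.pyRange 0 idx 1) < idx := by
  rcases checkFindGt_mem p cm (PySem.List.pyRange 0 idx 1) with h' | h'
  · exact absurd h' h
  · exact PySem.List.mem_pyRange_one.1 h'

theorem pv_lt_right (p : List Int) (cm n idx : Int)
    (h : checkFindLt p cm (PySem.List.pyRange (n - 1) idx (-1)) ≠ -1) :
    idx < checkFindLt p cm (PySem.List.pyRange (n - 1) idx (-1)) ∧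
      checkFindLt p cm (PySem.List.pyRange (n - 1) idx (-1)) ≤ n - 1 := by
  rcases checkFindLt_mem p cm (PySem.List.pyRange (n - 1) idx (-1)) with h' | h'
  · exact absurd h' h
  · exact PySem.List.mem_pyRange_neg_one.1 h'

theorem pv_gt_right (p : List Int) (cm n idx : Int)
    (h : checkFindGt p cm (PySem.List.pyRange (n - 1) idx (-1)) ≠ -1) :
    idx < checkFindGt p cm (PySem.List.pyRange (n - 1) idx (-1)) ∧
      checkFindGt p cm (PySem.List.pyRange (n - 1) idx (-1)) ≤ n - 1 := by
  rcases checkFindGt_mem p cm (PySem.List.pyRange (n - 1) idx (-1)) with h' | h'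
  · exact absurd h' h
  · exact PySem.List.mem_pyRange_neg_one.1 h'

theorem checkGoStep_shape (p x : List Int) (n : Int)
    (rec : List Int → List (List Int) → Int → Option (List (List Int)))
    (s : List Int) (ops : List (List Int)) (step : Int)
    (h5 : ¬ step = 5) (hidx : ¬ (checkFindMax p x s n).2 = -1)
    (h0 : 0 ≤ (checkFindMax p x s n).2) :
    checkGoStep p x n rec s ops step =
      (pvOrElse (if checkFindGt p (checkFindMax p x s n).1 (PySem.List.pyRange (n - 1) (checkFindMax p x s n).2 (-1)) ≠ -1 ∧
                 checkFindLt p (checkFindMax p x s n).1 (PySem.List.pyRange 0 (checkFindMax p x s n).2 1) ≠ -1 then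
            rec (pvApplyOp x s (checkFindLt p (checkFindMax p x s n).1 (PySem.List.pyRange 0 (checkFindMax p x s n).2 1) + 1)
                  (checkFindGt p (checkFindMax p x s n).1 (PySem.List.pyRange (n - 1) (checkFindMax p x s n).2 (-1))))
                (ops ++ [[checkFindLt p (checkFindMax p x s n).1 (PySem.List.pyRange 0 (checkFindMax p x s n).2 1) + 1,
                          checkFindGt p (checkFindMax p x s n).1 (PySem.List.pyRange (n - 1) (checkFindMax p x s n).2 (-1)) + 1]])
                (step + 1)
          else none)
        (if checkFindGt p (checkFindMax p x s n).1 (PySem.List.pyRange 0 (checkFindMax p x s n).2 1) ≠ -1 ∧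
           checkFindLt p (checkFindMax p x s n).1 (PySem.List.pyRange (n - 1) (checkFindMax p x s n).2 (-1)) ≠ -1 then
          rec (pvApplyOp x s (checkFindGt p (checkFindMax p x s n).1 (PySem.List.pyRange 0 (checkFindMax p x s n).2 1) + 1)
                (checkFindLt p (checkFindMax p x s n).1 (PySem.List.pyRange (n - 1) (checkFindMax p x s n).2 (-1))))
              (ops ++ [[checkFindGt p (checkFindMax p x s n).1 (PySem.List.pyRange 0 (checkFindMax p x s n).2 1) + 1,
                        checkFindLt p (checkFindMax p x s n).1 (PySem.List.pyRange (n - 1) (checkFindMax p x s n).2 (-1)) + 1]])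
              (step + 1)
        else none)) := by
  unfold checkGoStep
  simp only [if_neg h5, if_neg hidx]
  rw [checkBounds_eq p (checkFindMax p x s n).1 (PySem.List.pyRange 0 (checkFindMax p x s n).2 1)
        (fun i hi => by have := PySem.List.mem_pyRange_one.1 hi; omega),
      checkBounds_eq p (checkFindMax p x s n).1 (PySem.List.pyRange (n - 1) (checkFindMax p x s n).2 (-1))
        (fun i hi => by have := PySem.List.mem_pyRange_neg_one.1 hi; omega)]

theorem checkGoStep_congr (p x : List Int) (n : Int)
    (rec1 rec2 : List Int → List (List Int) → Int → Option (List (List Int)))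
    (s : List Int) (ops : List (List Int)) (step : Int)
    (hs : n ≤ (s.length : Int))
    (h : ∀ s' ops', s'.length = s.length → pvCnt p x s' n < pvCnt p x s n →
      rec1 s' ops' (step + 1) = rec2 s' ops' (step + 1)) :
    checkGoStep p x n rec1 s ops step = checkGoStep p x n rec2 s ops step := by
  by_cases h5 : step = 5
  · unfold checkGoStep; simp only [if_pos h5]
  by_cases hidx : (checkFindMax p x s n).2 = -1
  · unfold checkGoStep; simp only [if_neg h5, if_pos hidx]
  rcases findMax_spec p x s n with hm | ⟨hi0, hin, hact, hcm⟩
  · exact absurd hm hidx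
  rw [checkGoStep_shape p x n rec1 s ops step h5 hidx hi0,
      checkGoStep_shape p x n rec2 s ops step h5 hidx hi0]
  have hchild : ∀ u v : Int, 0 ≤ u → u < (checkFindMax p x s n).2 → (checkFindMax p x s n).2 < v →
      rec1 (pvApplyOp x s (u + 1) v) (ops ++ [[u + 1, v + 1]]) (step + 1) =
      rec2 (pvApplyOp x s (u + 1) v) (ops ++ [[u + 1, v + 1]]) (step + 1) := by
    intro u v hu huidx hvidx
    apply h
    · exact applyOp_length x s (u + 1) v
    · exact cnt_child_lt p x s n (u + 1) v (checkFindMax p x s n).2 hact hi0 hin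
        (by omega) hvidx (by omega) (by omega)
  have e1 : (if checkFindGt p (checkFindMax p x s n).1 (PySem.List.pyRange (n - 1) (checkFindMax p x s n).2 (-1)) ≠ -1 ∧
                checkFindLt p (checkFindMax p x s n).1 (PySem.List.pyRange 0 (checkFindMax p x s n).2 1) ≠ -1 then
          rec1 (pvApplyOp x s (checkFindLt p (checkFindMax p x s n).1 (PySem.List.pyRange 0 (checkFindMax p x s n).2 1) + 1)
                (checkFindGt p (checkFindMax p x s n).1 (PySem.List.pyRange (n - 1) (checkFindMax p x s n).2 (-1))))
              (ops ++ [[checkFindLt p (checkFindMax p x s n).1 (PySem.List.pyRange 0 (checkFindMax p x s n).2 1) + 1,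
                        checkFindGt p (checkFindMax p x s n).1 (PySem.List.pyRange (n - 1) (checkFindMax p x s n).2 (-1)) + 1]])
              (step + 1)
        else none) =
      (if checkFindGt p (checkFindMax p x s n).1 (PySem.List.pyRange (n - 1) (checkFindMax p x s n).2 (-1)) ≠ -1 ∧
                checkFindLt p (checkFindMax p x s n).1 (PySem.List.pyRange 0 (checkFindMax p x s n).2 1) ≠ -1 then
          rec2 (pvApplyOp x s (checkFindLt p (checkFindMax p x s n).1 (PySem.List.pyRange 0 (checkFindMax p x s n).2 1) + 1)
                (checkFindGt p (checkFindMax p x s n).1 (PySem.List.pyRange (n - 1) (checkFindMax p x s n).2 (-1))))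
              (ops ++ [[checkFindLt p (checkFindMax p x s n).1 (PySem.List.pyRange 0 (checkFindMax p x s n).2 1) + 1,
                        checkFindGt p (checkFindMax p x s n).1 (PySem.List.pyRange (n - 1) (checkFindMax p x s n).2 (-1)) + 1]])
              (step + 1)
        else none) := by
    split_ifs with hb
    · exact hchild _ _ (pv_lt_left p _ _ hb.2).1 (pv_lt_left p _ _ hb.2).2 (pv_gt_right p _ n _ hb.1).1
    · rfl
  have e2 : (if checkFindGt p (checkFindMax p x s n).1 (PySem.List.pyRange 0 (checkFindMax p x s n).2 1) ≠ -1 ∧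
                checkFindLt p (checkFindMax p x s n).1 (PySem.List.pyRange (n - 1) (checkFindMax p x s n).2 (-1)) ≠ -1 then
          rec1 (pvApplyOp x s (checkFindGt p (checkFindMax p x s n).1 (PySem.List.pyRange 0 (checkFindMax p x s n).2 1) + 1)
                (checkFindLt p (checkFindMax p x s n).1 (PySem.List.pyRange (n - 1) (checkFindMax p x s n).2 (-1))))
              (ops ++ [[checkFindGt p (checkFindMax p x s n).1 (PySem.List.pyRange 0 (checkFindMax p x s n).2 1) + 1,
                        checkFindLt p (checkFindMax p x s n).1 (PySem.List.pyRange (n - 1) (checkFindMax p x s n).2 (-1)) + 1]])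
              (step + 1)
        else none) =
      (if checkFindGt p (checkFindMax p x s n).1 (PySem.List.pyRange 0 (checkFindMax p x s n).2 1) ≠ -1 ∧
                checkFindLt p (checkFindMax p x s n).1 (PySem.List.pyRange (n - 1) (checkFindMax p x s n).2 (-1)) ≠ -1 then
          rec2 (pvApplyOp x s (checkFindGt p (checkFindMax p x s n).1 (PySem.List.pyRange 0 (checkFindMax p x s n).2 1) + 1)
                (checkFindLt p (checkFindMax p x s n).1 (PySem.List.pyRange (n - 1) (checkFindMax p x s n).2 (-1))))
              (ops ++ [[checkFindGt p (checkFindMax p x s n).1 (PySem.List.pyRange 0 (checkFindMax p x s n).2 1) + 1,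
                        checkFindLt p (checkFindMax p x s n).1 (PySem.List.pyRange (n - 1) (checkFindMax p x s n).2 (-1)) + 1]])
              (step + 1)
        else none) := by
    split_ifs with hb
    · exact hchild _ _ (pv_gt_left p _ _ hb.1).1 (pv_gt_left p _ _ hb.1).2 (pv_lt_right p _ n _ hb.2).1
    · rfl
  rw [e1, e2]

theorem checkGo_fuel (p x : List Int) (n : Int) :
    ∀ (f g : Nat) (s : List Int) (ops : List (List Int)) (step : Int),
      n ≤ (s.length : Int) → pvCnt p x s n < f → pvCnt p x s n < g →
      checkGo p x n f s ops step = checkGo p x n g s ops step := by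
  intro f
  induction f with
  | zero => intro g s ops step _ hf _; exact absurd hf (Nat.not_lt_zero _)
  | succ f ih =>
    intro g s ops step hs hf hg
    obtain ⟨g', rfl⟩ : ∃ g', g = g' + 1 := ⟨g - 1, by omega⟩
    show checkGoStep p x n (checkGo p x n f) s ops step =
      checkGoStep p x n (checkGo p x n g') s ops step
    apply checkGoStep_congr p x n _ _ s ops step hs
    intro s' ops' hlen hcnt
    exact ih g' s' ops' (step + 1) (by rw [hlen]; exact hs) (by omega) (by omega)


theorem pv_orElse_assoc {α : Type} (o1 o2 o3 : Option α) :
    pvOrElse (pvOrElse o1 o2) o3 = pvOrElse o1 (pvOrElse o2 o3) := by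
  cases o1 <;> rfl

theorem pv_orElse_none_left {α : Type} (e : Option α) : pvOrElse none e = e := rfl

theorem pv_pow_le (a b : Nat) (h : a ≤ b) : 2 ^ a ≤ 2 ^ b :=
  Nat.pow_le_pow_right (by omega) h

theorem pv_cnt_pos (p x cs : List Int) (n : Int)
    (hi0 : 0 ≤ (checkFindMax p x cs n).2) (hin : (checkFindMax p x cs n).2 < n)
    (hact : pvActive p x cs (checkFindMax p x cs n).2) :
    1 ≤ pvCnt p x cs n := by
  by_contra h
  have h0 : pvCnt p x cs n = 0 := by omega
  unfold pvCnt at h0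
  have := List.countP_eq_zero.1 h0 (checkFindMax p x cs n).2
    (PySem.List.mem_pyRange_one.2 ⟨hi0, hin⟩)
  simp only [decide_eq_true_eq] at this
  exact this hact

theorem loop_eq_run (p x : List Int) (n : Int) :
    ∀ (fuel : Nat) (st : List (List Int × List (List Int) × Int)),
      (∀ fr ∈ st, n ≤ (fr.1.length : Int)) →
      (st.map (fun fr => 2 ^ (pvCnt p x fr.1 n + 2) - 1)).sum ≤ fuel →
      checkLoop p x n fuel st = pvRun p x n st := by
  intro fuel
  induction fuel with
  | zero =>
    intro st hmem hsum
    cases st with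
    | nil => rfl
    | cons fr rest =>
      exfalso
      have h4 : 4 ≤ 2 ^ (pvCnt p x fr.1 n + 2) := pv_pow_le 2 _ (by omega)
      simp only [List.map_cons, List.sum_cons, Nat.le_zero] at hsum
      omega
  | succ fuel ih =>
    intro st hmem hsum
    cases st with
    | nil => rfl
    | cons fr rest =>
      obtain ⟨cs, ops, step⟩ := fr
      have hhead : n ≤ (cs.length : Int) := hmem _ List.mem_cons_self
      have hmemr : ∀ fr ∈ rest, n ≤ (fr.1.length : Int) :=
        fun fr hfr => hmem fr (List.mem_cons_of_mem _ hfr)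
      have h4 : 4 ≤ 2 ^ (pvCnt p x cs n + 2) := pv_pow_le 2 _ (by omega)
      have hsum' : 2 ^ (pvCnt p x cs n + 2) - 1 +
          (rest.map (fun fr => 2 ^ (pvCnt p x fr.1 n + 2) - 1)).sum ≤ fuel + 1 := by
        simpa using hsum
      have hE : checkGo p x n (pvCnt p x cs n + 1) cs ops step =
          checkGoStep p x n (checkGo p x n (pvCnt p x cs n)) cs ops step := rfl
      by_cases h5 : step = 5
      · simp only [checkLoop, pvRun, hE, if_pos h5]
        unfold checkGoStep
        rw [if_pos h5, checkScan_eq_ok]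
        by_cases hok : checkAltOk x cs n = true
        · rw [if_pos hok, if_pos hok]; rfl
        · rw [if_neg hok, if_neg hok, pv_orElse_none_left]
          exact ih rest hmemr (by omega)
      · by_cases hidx : (checkFindMax p x cs n).2 = -1
        · simp only [checkLoop, pvRun, hE, if_neg h5]
          unfold checkGoStep
          rw [if_neg h5]
          simp only [if_pos hidx]
          rfl
        · rcases findMax_spec p x cs n with hm | ⟨hi0, hin, hact, hcm⟩
          · exact absurd hm hidx
          have hc1 : 1 ≤ pvCnt p x cs n := pv_cnt_pos p x cs n hi0 hin hact
          simp only [checkLoop, pvRun, hE, if_neg h5, if_neg hidx]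
          rw [checkGoStep_shape p x n _ cs ops step h5 hidx hi0, pv_orElse_assoc]
          by_cases hb1 : checkFindGt p (checkFindMax p x cs n).1 (PySem.List.pyRange (n - 1) (checkFindMax p x cs n).2 (-1)) ≠ -1 ∧
              checkFindLt p (checkFindMax p x cs n).1 (PySem.List.pyRange 0 (checkFindMax p x cs n).2 1) ≠ -1
          · -- branch 1 exists
            have hml := pv_lt_left p _ _ hb1.2
            have hMr := pv_gt_right p _ n _ hb1.1
            have hcnt1 : pvCnt p x (pvApplyOp x cs (checkFindLt p (checkFindMax p x cs n).1 (PySem.List.pyRange 0 (checkFindMax p x cs n).2 1) + 1) (checkFindGt p (checkFindMax p x cs n).1 (PySem.List.pyRange (n - 1) (checkFindMax p x cs n).2 (-1)))) n < pvCnt p x cs n :=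
              cnt_child_lt p x cs n _ _ (checkFindMax p x cs n).2 hact hi0 hin
                (by omega) (by omega) (by omega) (by omega)
            have hlen1 : ((pvApplyOp x cs (checkFindLt p (checkFindMax p x cs n).1 (PySem.List.pyRange 0 (checkFindMax p x cs n).2 1) + 1) (checkFindGt p (checkFindMax p x cs n).1 (PySem.List.pyRange (n - 1) (checkFindMax p x cs n).2 (-1)))).length : Int) = (cs.length : Int) := by
              rw [applyOp_length]
            have hT1 : 2 ^ (pvCnt p x (pvApplyOp x cs (checkFindLt p (checkFindMax p x cs n).1 (PySem.List.pyRange 0 (checkFindMax p x cs n).2 1) + 1) (checkFindGt p (checkFindMax p x cs n).1 (PySem.List.pyRange (n - 1) (checkFindMax p x cs n).2 (-1)))) n + 2) ≤ 2 ^ (pvCnt p x cs n + 1) :=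
              pv_pow_le _ _ (by omega)
            have hfuel1 : checkGo p x n (pvCnt p x cs n) (pvApplyOp x cs (checkFindLt p (checkFindMax p x cs n).1 (PySem.List.pyRange 0 (checkFindMax p x cs n).2 1) + 1) (checkFindGt p (checkFindMax p x cs n).1 (PySem.List.pyRange (n - 1) (checkFindMax p x cs n).2 (-1)))) (ops ++ [[checkFindLt p (checkFindMax p x cs n).1 (PySem.List.pyRange 0 (checkFindMax p x cs n).2 1) + 1, checkFindGt p (checkFindMax p x cs n).1 (PySem.List.pyRange (n - 1) (checkFindMax p x cs n).2 (-1)) + 1]]) (step + 1) =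
                checkGo p x n (pvCnt p x (pvApplyOp x cs (checkFindLt p (checkFindMax p x cs n).1 (PySem.List.pyRange 0 (checkFindMax p x cs n).2 1) + 1) (checkFindGt p (checkFindMax p x cs n).1 (PySem.List.pyRange (n - 1) (checkFindMax p x cs n).2 (-1)))) n + 1) (pvApplyOp x cs (checkFindLt p (checkFindMax p x cs n).1 (PySem.List.pyRange 0 (checkFindMax p x cs n).2 1) + 1) (checkFindGt p (checkFindMax p x cs n).1 (PySem.List.pyRange (n - 1) (checkFindMax p x cs n).2 (-1)))) (ops ++ [[checkFindLt p (checkFindMax p x cs n).1 (PySem.List.pyRange 0 (checkFindMax p x cs n).2 1) + 1, checkFindGt p (checkFindMax p x cs n).1 (PySem.List.pyRange (n - 1) (checkFindMax p x cs n).2 (-1)) + 1]]) (step + 1) :=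
              checkGo_fuel p x n _ _ _ _ _ (by rw [hlen1]; exact hhead) (by omega) (by omega)
            rw [if_pos hb1, if_pos hb1, hfuel1]
            by_cases hb2 : checkFindGt p (checkFindMax p x cs n).1 (PySem.List.pyRange 0 (checkFindMax p x cs n).2 1) ≠ -1 ∧
                checkFindLt p (checkFindMax p x cs n).1 (PySem.List.pyRange (n - 1) (checkFindMax p x cs n).2 (-1)) ≠ -1
            · have hMl := pv_gt_left p _ _ hb2.1
              have hmr := pv_lt_right p _ n _ hb2.2
              have hcnt2 : pvCnt p x (pvApplyOp x cs (checkFindGt p (checkFindMax p x cs n).1 (PySem.List.pyRange 0 (checkFindMax p x cs n).2 1) + 1) (checkFindLt p (checkFindMax p x cs n).1 (PySem.List.pyRange (n - 1) (checkFindMax p x cs n).2 (-1)))) n < pvCnt p x cs n :=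
                cnt_child_lt p x cs n _ _ (checkFindMax p x cs n).2 hact hi0 hin
                  (by omega) (by omega) (by omega) (by omega)
              have hlen2 : ((pvApplyOp x cs (checkFindGt p (checkFindMax p x cs n).1 (PySem.List.pyRange 0 (checkFindMax p x cs n).2 1) + 1) (checkFindLt p (checkFindMax p x cs n).1 (PySem.List.pyRange (n - 1) (checkFindMax p x cs n).2 (-1)))).length : Int) = (cs.length : Int) := by
                rw [applyOp_length]
              have hT2 : 2 ^ (pvCnt p x (pvApplyOp x cs (checkFindGt p (checkFindMax p x cs n).1 (PySem.List.pyRange 0 (checkFindMax p x cs n).2 1) + 1) (checkFindLt p (checkFindMax p x cs n).1 (PySem.List.pyRange (n - 1) (checkFindMax p x cs n).2 (-1)))) n + 2) ≤ 2 ^ (pvCnt p x cs n + 1) :=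
                pv_pow_le _ _ (by omega)
              have hfuel2 : checkGo p x n (pvCnt p x cs n) (pvApplyOp x cs (checkFindGt p (checkFindMax p x cs n).1 (PySem.List.pyRange 0 (checkFindMax p x cs n).2 1) + 1) (checkFindLt p (checkFindMax p x cs n).1 (PySem.List.pyRange (n - 1) (checkFindMax p x cs n).2 (-1)))) (ops ++ [[checkFindGt p (checkFindMax p x cs n).1 (PySem.List.pyRange 0 (checkFindMax p x cs n).2 1) + 1, checkFindLt p (checkFindMax p x cs n).1 (PySem.List.pyRange (n - 1) (checkFindMax p x cs n).2 (-1)) + 1]]) (step + 1) =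
                  checkGo p x n (pvCnt p x (pvApplyOp x cs (checkFindGt p (checkFindMax p x cs n).1 (PySem.List.pyRange 0 (checkFindMax p x cs n).2 1) + 1) (checkFindLt p (checkFindMax p x cs n).1 (PySem.List.pyRange (n - 1) (checkFindMax p x cs n).2 (-1)))) n + 1) (pvApplyOp x cs (checkFindGt p (checkFindMax p x cs n).1 (PySem.List.pyRange 0 (checkFindMax p x cs n).2 1) + 1) (checkFindLt p (checkFindMax p x cs n).1 (PySem.List.pyRange (n - 1) (checkFindMax p x cs n).2 (-1)))) (ops ++ [[checkFindGt p (checkFindMax p x cs n).1 (PySem.List.pyRange 0 (checkFindMax p x cs n).2 1) + 1, checkFindLt p (checkFindMax p x cs n).1 (PySem.List.pyRange (n - 1) (checkFindMax p x cs n).2 (-1)) + 1]]) (step + 1) :=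
                checkGo_fuel p x n _ _ _ _ _ (by rw [hlen2]; exact hhead) (by omega) (by omega)
              rw [if_pos hb2, if_pos hb2, hfuel2]
              rw [ih _ (by
                    intro fr hfr
                    rcases List.mem_cons.1 hfr with rfl | hfr'
                    · rw [hlen1]; exact hhead
                    rcases List.mem_cons.1 hfr' with rfl | hfr''
                    · rw [hlen2]; exact hhead
                    · exact hmemr _ hfr'')
                  (by
                    simp only [List.map_cons, List.sum_cons]
                    have hpp : 2 ^ (pvCnt p x cs n + 2) = 2 ^ (pvCnt p x cs n + 1) * 2 :=
                      pow_succ 2 _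
                    omega)]
              simp [pvRun]
            · rw [if_neg hb2, if_neg hb2, pv_orElse_none_left]
              rw [ih _ (by
                    intro fr hfr
                    rcases List.mem_cons.1 hfr with rfl | hfr'
                    · rw [hlen1]; exact hhead
                    · exact hmemr _ hfr')
                  (by
                    simp only [List.map_cons, List.sum_cons]
                    have hpp : 2 ^ (pvCnt p x cs n + 2) = 2 ^ (pvCnt p x cs n + 1) * 2 :=
                      pow_succ 2 _
                    omega)]
              simp [pvRun]
          · rw [if_neg hb1, if_neg hb1, pv_orElse_none_left]
            by_cases hb2 : checkFindGt p (checkFindMax p x cs n).1 (PySem.List.pyRange 0 (checkFindMax p x cs n).2 1) ≠ -1 ∧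
                checkFindLt p (checkFindMax p x cs n).1 (PySem.List.pyRange (n - 1) (checkFindMax p x cs n).2 (-1)) ≠ -1
            · have hMl := pv_gt_left p _ _ hb2.1
              have hmr := pv_lt_right p _ n _ hb2.2
              have hcnt2 : pvCnt p x (pvApplyOp x cs (checkFindGt p (checkFindMax p x cs n).1 (PySem.List.pyRange 0 (checkFindMax p x cs n).2 1) + 1) (checkFindLt p (checkFindMax p x cs n).1 (PySem.List.pyRange (n - 1) (checkFindMax p x cs n).2 (-1)))) n < pvCnt p x cs n :=
                cnt_child_lt p x cs n _ _ (checkFindMax p x cs n).2 hact hi0 hin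
                  (by omega) (by omega) (by omega) (by omega)
              have hlen2 : ((pvApplyOp x cs (checkFindGt p (checkFindMax p x cs n).1 (PySem.List.pyRange 0 (checkFindMax p x cs n).2 1) + 1) (checkFindLt p (checkFindMax p x cs n).1 (PySem.List.pyRange (n - 1) (checkFindMax p x cs n).2 (-1)))).length : Int) = (cs.length : Int) := by
                rw [applyOp_length]
              have hT2 : 2 ^ (pvCnt p x (pvApplyOp x cs (checkFindGt p (checkFindMax p x cs n).1 (PySem.List.pyRange 0 (checkFindMax p x cs n).2 1) + 1) (checkFindLt p (checkFindMax p x cs n).1 (PySem.List.pyRange (n - 1) (checkFindMax p x cs n).2 (-1)))) n + 2) ≤ 2 ^ (pvCnt p x cs n + 1) :=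
                pv_pow_le _ _ (by omega)
              have hfuel2 : checkGo p x n (pvCnt p x cs n) (pvApplyOp x cs (checkFindGt p (checkFindMax p x cs n).1 (PySem.List.pyRange 0 (checkFindMax p x cs n).2 1) + 1) (checkFindLt p (checkFindMax p x cs n).1 (PySem.List.pyRange (n - 1) (checkFindMax p x cs n).2 (-1)))) (ops ++ [[checkFindGt p (checkFindMax p x cs n).1 (PySem.List.pyRange 0 (checkFindMax p x cs n).2 1) + 1, checkFindLt p (checkFindMax p x cs n).1 (PySem.List.pyRange (n - 1) (checkFindMax p x cs n).2 (-1)) + 1]]) (step + 1) =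
                  checkGo p x n (pvCnt p x (pvApplyOp x cs (checkFindGt p (checkFindMax p x cs n).1 (PySem.List.pyRange 0 (checkFindMax p x cs n).2 1) + 1) (checkFindLt p (checkFindMax p x cs n).1 (PySem.List.pyRange (n - 1) (checkFindMax p x cs n).2 (-1)))) n + 1) (pvApplyOp x cs (checkFindGt p (checkFindMax p x cs n).1 (PySem.List.pyRange 0 (checkFindMax p x cs n).2 1) + 1) (checkFindLt p (checkFindMax p x cs n).1 (PySem.List.pyRange (n - 1) (checkFindMax p x cs n).2 (-1)))) (ops ++ [[checkFindGt p (checkFindMax p x cs n).1 (PySem.List.pyRange 0 (checkFindMax p x cs n).2 1) + 1, checkFindLt p (checkFindMax p x cs n).1 (PySem.List.pyRange (n - 1) (checkFindMax p x cs n).2 (-1)) + 1]]) (step + 1) :=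
                checkGo_fuel p x n _ _ _ _ _ (by rw [hlen2]; exact hhead) (by omega) (by omega)
              rw [if_pos hb2, if_pos hb2, hfuel2]
              rw [ih _ (by
                    intro fr hfr
                    rcases List.mem_cons.1 hfr with rfl | hfr'
                    · rw [hlen2]; exact hhead
                    · exact hmemr _ hfr')
                  (by
                    simp only [List.map_cons, List.sum_cons]
                    have hpp : 2 ^ (pvCnt p x cs n + 2) = 2 ^ (pvCnt p x cs n + 1) * 2 :=
                      pow_succ 2 _
                    omega)]
              simp [pvRun]
            · rw [if_neg hb2, if_neg hb2, pv_orElse_none_left]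
              exact ih _ hmemr (by omega)

theorem check_spec_main (p x s : List Int) (n : Int) (ops : List (List Int)) (step : Int)
    (h3 : n ≤ (s.length : Int)) :
    check p x s n ops step = check_alt p x s n ops step := by
  unfold check check_alt
  have hc : pvCnt p x s n ≤ n.toNat := pvCnt_le p x s n
  rw [checkGo_fuel p x n (n.toNat + 3) (pvCnt p x s n + 1) s ops step h3 (by omega) (by omega)]
  rw [loop_eq_run p x n _ _ (by
        intro fr hfr
        rcases List.mem_cons.1 hfr with rfl | hfr'
        · exact h3
        · exact absurd hfr' (List.not_mem_nil))
      (by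
        simp only [List.map_cons, List.map_nil, List.sum_cons, List.sum_nil]
        have := pv_pow_le (pvCnt p x s n + 2) (n.toNat + 3) (by omega)
        norm_num at this ⊢
        omega)]
  simp only [pvRun]
  cases checkGo p x n (pvCnt p x s n + 1) s ops step <;> rfl

-- ===== VERDICT (by name: the statement is the Claim_ definition above) =====
theorem check_spec : Claim_equal_check := by
  intro p x s n current_ops current_step _ hpre
  unfold Spec_check
  exact check_spec_main p x s n current_ops current_step hpre.2.1
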